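-- pv_equiv track=rewrite | github.com/Tomas-Tamantini/advent-of-code-python | models/aoc_2017/a2017_d9.py | stream_groups_total_score
-- ===== SOURCE A (Python) =====
-- def stream_groups_total_score(stream: str) -> int:
--     total_score = 0
--     current_score = 0
--     is_inside_garbage = False
--     char_idx = 0
--     while char_idx < len(stream):
--         c = stream[char_idx]
--         if c == "!":
--             char_idx += 2
--             continue
--         elif c == "<":
--             is_inside_garbage = True
--         elif c == ">":
--             is_inside_garbage = False
--         elif c == "{" and not is_inside_garbage:
--             current_score += 1
--             total_score += current_score
--         elif c == "}" and not is_inside_garbage: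
--             current_score -= 1
--         char_idx += 1
--     return total_score
-- ===== SOURCE B (Python) =====
-- def stream_groups_total_score(stream: str) -> int:
--     # pass 1: drop every '!' together with the character it cancels
--     kept = []
--     chars = iter(stream)
--     for c in chars:
--         if c == "!":
--             next(chars, None)
--         else:
--             kept.append(c)
--     # pass 2: drop garbage bodies '<...>' (an unterminated '<' drops to end);
--     # the closing '>' itself is kept, it is inert in the counting pass
--     clean = []
--     in_garbage = False
--     for c in kept:
--         if in_garbage:
--             in_garbage = c != ">"
--         elif c == "<":
--             in_garbage = True
--         else:
--             clean.append(c)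
--     # pass 3: running depth / total
--     total = depth = 0
--     for c in clean:
--         if c == "{":
--             depth += 1
--             total += depth
--         elif c == "}":
--             depth -= 1
--     return total
-- ===== Notes on version B (the rewrite author's own statement) =====
-- stated objective: simpler
-- what changed: Replaced A's single interleaved index-jumping state machine with three independent linear passes: strip cancel pairs, strip garbage bodies, then count running depth.
import Mathlib
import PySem

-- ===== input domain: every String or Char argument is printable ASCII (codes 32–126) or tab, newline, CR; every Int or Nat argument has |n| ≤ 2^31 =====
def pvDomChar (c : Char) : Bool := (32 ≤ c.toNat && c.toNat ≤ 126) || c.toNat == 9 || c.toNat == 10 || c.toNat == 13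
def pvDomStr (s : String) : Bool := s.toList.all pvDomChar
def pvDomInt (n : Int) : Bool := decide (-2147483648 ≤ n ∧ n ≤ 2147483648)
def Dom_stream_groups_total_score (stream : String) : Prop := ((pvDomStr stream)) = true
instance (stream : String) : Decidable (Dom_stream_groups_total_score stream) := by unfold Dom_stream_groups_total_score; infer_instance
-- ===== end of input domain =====

-- B replaces A's single interleaved state machine by three independent linear passes (objective: simpler); same return value on all inputs.
-- ===== PORT A =====
-- the while loop over char_idx, ported as recursion on the remaining characters ('!' skips two)
def pvGoA : List Char → Int → Int → Bool → Int
  | [], total, _, _ => total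
  | c :: rest, total, cur, g =>
    if c = '!' then
      match rest with
      | [] => total
      | _ :: r => pvGoA r total cur g
    else if c = '<' then pvGoA rest total cur true
    else if c = '>' then pvGoA rest total cur false
    else if c = '{' ∧ ¬ g then pvGoA rest (total + (cur + 1)) (cur + 1) g
    else if c = '}' ∧ ¬ g then pvGoA rest total (cur - 1) g
    else pvGoA rest total cur g

def stream_groups_total_score (stream : String) : Int :=
  pvGoA stream.toList 0 0 false

-- ===== PORT B =====
-- pass 1: drop every '!' together with the character it cancels
def pvStripCancels : List Char → List Char
  | [] => []
  | '!' :: [] => []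
  | '!' :: _ :: r => pvStripCancels r
  | c :: r => c :: pvStripCancels r

-- pass 2: drop garbage bodies (flag = currently inside garbage)
def pvStripGarbage : List Char → Bool → List Char
  | [], _ => []
  | c :: r, true => pvStripGarbage r (c != '>')
  | c :: r, false => if c = '<' then pvStripGarbage r true else c :: pvStripGarbage r false

-- pass 3: running depth / total
def pvCount : List Char → Int → Int → Int
  | [], total, _ => total
  | c :: r, total, depth =>
    if c = '{' then pvCount r (total + (depth + 1)) (depth + 1)
    else if c = '}' then pvCount r total (depth - 1)
    else pvCount r total depth

def stream_groups_total_score_alt (stream : String) : Int :=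
  pvCount (pvStripGarbage (pvStripCancels stream.toList) false) 0 0

-- ===== PRECONDITION & SPEC =====
def Spec_stream_groups_total_score (stream : String) (out : Int) : Prop := out = stream_groups_total_score_alt stream
instance (stream : String) (out : Int) : Decidable (Spec_stream_groups_total_score stream out) := by unfold Spec_stream_groups_total_score; infer_instance

-- ===== CLAIM (what is proved, stated in full; the proofs are below) =====
def Claim_equal_stream_groups_total_score : Prop := ∀ (stream : String), Dom_stream_groups_total_score stream → Spec_stream_groups_total_score stream (stream_groups_total_score stream)

-- ===== LEMMAS AND PROOFS =====
theorem pvMain : ∀ (l : List Char) (total cur : Int) (g : Bool),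
    pvGoA l total cur g = pvCount (pvStripGarbage (pvStripCancels l) g) total cur := by
  intro l
  induction l using pvStripCancels.induct with
  | case1 => intro total cur g; simp [pvGoA, pvStripCancels, pvStripGarbage, pvCount]
  | case2 => intro total cur g; rw [pvGoA.eq_def]; simp [pvStripCancels, pvStripGarbage, pvCount]
  | case3 c r ih =>
    intro total cur g
    rw [pvGoA.eq_def]
    simp only [pvStripCancels]
    exact ih total cur g
  | case4 c r hne hne2 ih =>
    intro total cur g
    have h1 : c ≠ '!' := fun h => by
      cases r with
      | nil => exact hne h rfl
      | cons d r' => exact hne2 d r' h rfl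
    simp only [pvStripCancels]
    rw [pvGoA.eq_def]
    cases g with
    | true =>
      by_cases h3 : c = '>'
      · subst h3; simp [pvStripGarbage, ih]
      · by_cases h2 : c = '<'
        · subst h2; simp [pvStripGarbage, ih]
        · have hb : (c != '>') = true := by simp [h3]
          simp [pvStripGarbage, hb, h1, h2, h3, ih]
    | false =>
      by_cases h2 : c = '<'
      · subst h2; simp [pvStripGarbage, h1, ih]
      · by_cases h3 : c = '>'
        · subst h3; simp [pvStripGarbage, pvCount, ih]
        · by_cases h4 : c = '{'
          · subst h4; simp [pvStripGarbage, pvCount, ih]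
          · by_cases h5 : c = '}'
            · subst h5; simp [pvStripGarbage, pvCount, ih]
            · simp [pvStripGarbage, pvCount, h1, h2, h3, h4, h5, ih]

-- ===== VERDICT (by name: the statement is the Claim_ definition above) =====
theorem stream_groups_total_score_spec : Claim_equal_stream_groups_total_score := by
  intro stream _
  unfold Spec_stream_groups_total_score stream_groups_total_score stream_groups_total_score_alt
  exact pvMain stream.toList 0 0 false
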